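-- pv_equiv track=rewrite | github.com/Tom-Sheiles/aoc2023 | day1.py | consume_reverse
-- ===== SOURCE A (Python) =====
-- numbers = ["zero", "one", "two", "three", "four", "five", "six", "seven", "eight", "nine"]
--
-- def findinlist(str, list):
--     if len(list) <= 0:
--         return -1
--
--     idx = str.find(list[0])
--     if idx < 0:
--         return findinlist(str, list[1:])
--     else:
--         return str[idx:idx+len(list[0])]
--
-- def consume_reverse(str, rest):
--     if len(rest) <= 0:
--         if not str[0].isalpha():
--             return str[0]
--         else:
--             return str
--
--     parsed_num = findinlist(str, numbers)
--     if parsed_num != -1: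
--         return consume_reverse(parsed_num, [])
--
--     if not str[0].isalpha():
--         return consume_reverse(str[0],[])
--     else:
--         return consume_reverse(rest[-1] + str, rest[0:-1])
-- ===== SOURCE B (Python) =====
-- numbers = ["zero", "one", "two", "three", "four", "five", "six", "seven", "eight", "nine"]
--
-- def consume_reverse(str, rest):
--     # Iterative: fold over rest from the end, growing the suffix; no recursion.
--     s = str
--     for chunk in reversed(rest):
--         match = next((w for w in numbers if w in s), None)
--         if match is not None:
--             return match
--         if not s[0].isalpha():
--             return s[0]
--         s = chunk + s
--     return s[0] if not s[0].isalpha() else s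
-- ===== Notes on version B (the rewrite author's own statement) =====
-- stated objective: simpler
-- what changed: Replaced the double recursion (tail-recursive consume_reverse plus recursive findinlist with find/slice) by a single iterative for-loop over reversed(rest) that grows the suffix, with the word search done by a membership scan over numbers returning the word itself.
import Mathlib
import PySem

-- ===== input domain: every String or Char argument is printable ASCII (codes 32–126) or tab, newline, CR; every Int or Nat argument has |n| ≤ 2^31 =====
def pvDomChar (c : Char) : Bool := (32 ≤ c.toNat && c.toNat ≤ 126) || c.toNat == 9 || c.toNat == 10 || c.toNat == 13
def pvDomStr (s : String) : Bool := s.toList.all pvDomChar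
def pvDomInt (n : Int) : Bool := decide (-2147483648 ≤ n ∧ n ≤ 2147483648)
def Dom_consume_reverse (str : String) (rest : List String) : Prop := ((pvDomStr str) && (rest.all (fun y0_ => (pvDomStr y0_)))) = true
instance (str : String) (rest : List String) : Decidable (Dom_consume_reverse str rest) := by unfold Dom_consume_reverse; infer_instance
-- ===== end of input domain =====

-- B changes the decomposition only (same cost): one iterative loop over reversed(rest)
-- instead of A's double recursion; return values proved equal on nonempty str.

-- ===== PORT A =====
-- numbers = ["zero", ..., "nine"]  (as char lists; strings are worked on as List Char per PySem)
def pvNumbers : List (List Char) :=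
  ["zero".toList, "one".toList, "two".toList, "three".toList, "four".toList,
   "five".toList, "six".toList, "seven".toList, "eight".toList, "nine".toList]

-- findinlist: returns -1 (here: none) or the matched substring str[idx:idx+len(list[0])]
def pvFindinlist (s : List Char) : List (List Char) → Option (List Char)
  | [] => none
  | w :: tl =>
    let idx := PySem.Chars.find s w
    if idx < 0 then pvFindinlist s tl
    else some (PySem.List.slice s (some idx) (some (idx + w.length)))

-- core of A on List Char; PySem.Chars.pyGet? is none exactly where Python's str[0] raises
-- IndexError (excluded by Pre_); recursion mirrors A's, measured by rest.length.
def pvCrA (s : List Char) (rest : List (List Char)) : List Char :=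
  if h : rest.length ≤ 0 then
    match PySem.Chars.pyGet? s 0 with
    | none => []                                   -- IndexError; outside Pre_
    | some c => if ¬ PySem.Chars.isalpha c then [c] else s
  else
    match pvFindinlist s pvNumbers with
    | some parsed => pvCrA parsed []
    | none =>
      match PySem.Chars.pyGet? s 0 with
      | none => []                                 -- IndexError; outside Pre_
      | some c =>
        if ¬ PySem.Chars.isalpha c then pvCrA [c] []
        else pvCrA (((PySem.List.pyGet? rest (-1)).getD []) ++ s)
                   (PySem.List.slice rest (some 0) (some (-1)))
termination_by rest.length
decreasing_by
  all_goals
    simp only [List.length_nil, PySem.List.slice_zero_start,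
      PySem.List.slice_to_neg_one, List.length_dropLast]
    omega

def consume_reverse (str : String) (rest : List String) : String :=
  String.ofList (pvCrA str.toList (rest.map String.toList))

-- ===== PORT B =====
-- loop body of B: iterate over reversed(rest), growing the suffix s
def pvCrB (s : List Char) : List (List Char) → List Char
  | [] =>
    match PySem.Chars.pyGet? s 0 with
    | none => []                                   -- IndexError; outside Pre_
    | some c => if ¬ PySem.Chars.isalpha c then [c] else s
  | chunk :: tl =>
    match pvNumbers.find? (fun w => PySem.Chars.isIn w s) with
    | some w => w
    | none =>
      match PySem.Chars.pyGet? s 0 with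
      | none => []                                 -- IndexError; outside Pre_
      | some c =>
        if ¬ PySem.Chars.isalpha c then [c]
        else pvCrB (chunk ++ s) tl

def consume_reverse_alt (str : String) (rest : List String) : String :=
  String.ofList (pvCrB str.toList (rest.map String.toList).reverse)

-- ===== PRECONDITION & SPEC =====
-- Pre_ excludes only str = "": there Python's str[0] raises IndexError (in A and in B).
def Pre_consume_reverse (str : String) (rest : List String) : Prop := str.toList ≠ []
instance (str : String) (rest : List String) : Decidable (Pre_consume_reverse str rest) := by
  unfold Pre_consume_reverse; infer_instance

def pvWitness_consume_reverse : String × List String := ("a1b", ["xy", "two"])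

def Spec_consume_reverse (str : String) (rest : List String) (out : String) : Prop := out = consume_reverse_alt str rest
instance (str : String) (rest : List String) (out : String) : Decidable (Spec_consume_reverse str rest out) := by unfold Spec_consume_reverse; infer_instance

-- ===== CLAIM (what is proved, stated in full; the proofs are below) =====
def Claim_equal_consume_reverse : Prop := ∀ (str : String) (rest : List String), Dom_consume_reverse str rest → Pre_consume_reverse str rest → Spec_consume_reverse str rest (consume_reverse str rest)

-- ===== LEMMAS AND PROOFS =====

-- A's findinlist over a word list = first word that occurs in s (the matched slice IS the word)
lemma pvFindinlist_eq (s : List Char) (L : List (List Char)) :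
    pvFindinlist s L = L.find? (fun w => PySem.Chars.isIn w s) := by
  induction L with
  | nil => rfl
  | cons w tl ih =>
    simp only [pvFindinlist, List.find?]
    by_cases h : PySem.Chars.find s w < 0
    · have hin : PySem.Chars.isIn w s = false := by
        have h1 := PySem.Chars.neg_one_le_find s w
        exact (PySem.Chars.isIn_eq_false_iff w s).mpr
          ((PySem.Chars.find_eq_neg_one_iff s w).mp (by omega))
      simp [h, hin, ih]
    · rw [not_lt] at h
      have hin : PySem.Chars.isIn w s = true := by
        rw [PySem.Chars.isIn_iff_infix]
        exact (PySem.Chars.find_nonneg_iff s w).mp h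
      have hslice : PySem.List.slice s (some (PySem.Chars.find s w))
          (some (PySem.Chars.find s w + w.length)) = w := by
        rw [PySem.List.slice_toNat s h (by positivity)]
        have ht : (PySem.Chars.find s w + (w.length : Int)).toNat
            = (PySem.Chars.find s w).toNat + w.length := by omega
        rw [ht]
        obtain ⟨t, hpre⟩ := (PySem.Chars.find_spec h).1
        rw [← hpre]; simp
      simp only [if_neg (not_lt.mpr h), hin]
      rw [hslice]

-- A with empty rest on a string starting with an alphabetic char returns it unchanged
lemma pvCrA_nil_alpha (c : Char) (cs : List Char) (h : PySem.Chars.isalpha c = true) :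
    pvCrA (c :: cs) [] = c :: cs := by
  rw [pvCrA]
  simp [PySem.List.pyGet?, PySem.List.pyIdx?, h]

-- A with empty rest on a string starting with a non-alphabetic char returns that char
lemma pvCrA_nil_notalpha (c : Char) (cs : List Char) (h : PySem.Chars.isalpha c = false) :
    pvCrA (c :: cs) [] = [c] := by
  rw [pvCrA]
  simp [PySem.List.pyGet?, PySem.List.pyIdx?, h]

-- A on a word of `numbers` with empty rest returns the word itself (all are alphabetic)
lemma pvCrA_word (w : List Char) (hw : w ∈ pvNumbers) : pvCrA w [] = w := by
  fin_cases hw <;> exact pvCrA_nil_alpha _ _ (by decide)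

-- main loop correspondence: A on (s, rev.reverse) = B's loop on (s, rev), for nonempty s
lemma pvCr_eq (rev : List (List Char)) (s : List Char) (hs : s ≠ []) :
    pvCrA s rev.reverse = pvCrB s rev := by
  induction rev generalizing s with
  | nil => rw [pvCrA]; rfl
  | cons chunk tl ih =>
    rw [pvCrA, pvCrB, List.reverse_cons]
    rw [dif_neg (show ¬((tl.reverse ++ [chunk]).length ≤ 0) by simp)]
    rw [pvFindinlist_eq]
    cases hf : pvNumbers.find? (fun w => PySem.Chars.isIn w s) with
    | some w =>
      exact pvCrA_word w (List.mem_of_find?_eq_some hf)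
    | none =>
      obtain ⟨c, cs, rfl⟩ := List.exists_cons_of_ne_nil hs
      simp only [PySem.Chars.pyGet?_eq_listPyGet?, PySem.List.pyGet?, PySem.List.pyIdx?]
      norm_num
      cases hc : PySem.Chars.isalpha c with
      | true =>
        have hget : PySem.List.pyGet? (tl.reverse ++ [chunk]) (-1) = some chunk := by
          simp [PySem.List.pyGet?, PySem.List.pyIdx?]
        have hsl : PySem.List.slice (tl.reverse ++ [chunk]) (some 0) (some (-1))
            = tl.reverse := by
          rw [PySem.List.slice_zero_start, PySem.List.slice_to_neg_one]
          exact List.dropLast_concat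
        rw [if_neg (by simp), if_neg (by simp),
          PySem.List.slice_to_neg_one, List.dropLast_concat]
        exact ih (chunk ++ c :: cs) (by simp)
      | false =>
        simp only [if_pos trivial]
        exact pvCrA_nil_notalpha c [] hc

-- ===== VERDICT (by name: the statement is the Claim_ definition above) =====
theorem consume_reverse_spec : Claim_equal_consume_reverse := by
  intro str rest _ hpre
  unfold Spec_consume_reverse consume_reverse consume_reverse_alt
  have h := pvCr_eq (rest.map String.toList).reverse str.toList hpre
  rw [List.reverse_reverse] at h
  rw [h]
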